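-- pv_equiv track=rewrite | github.com/Giousned/Python_Exercices_MASTER | exercises/41-frequency-of-words/app.py | words_output
-- ===== SOURCE A (Python) =====
-- def words_output(string):
--
--     freq = {}   # frequency of words in text
--     str_final = ""
--     # line = "New to Python or choosing between Python 2 and Python 3? Read Python 2 or Python 3."
--
--     for word in string.split():
--         freq[word] = freq.get(word,0)+1
--
--     words = list(freq.keys())
--     # sorted(words)
--     words.sort()
--
--     for w in words:
--         str_final += ("%s:%d " % (w, freq[w]))
--
--     return str_final.rstrip()
-- ===== SOURCE B (Python) =====
-- def words_output(string):
--     # sort the full token list, then emit one "word:count " per consecutive run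
--     words = sorted(string.split())
--     out = ""
--     cur = None
--     cnt = 0
--     for w in words:
--         if cur is not None and w == cur:
--             cnt += 1
--         else:
--             if cur is not None:
--                 out += "%s:%d " % (cur, cnt)
--             cur = w
--             cnt = 1
--     if cur is not None:
--         out += "%s:%d " % (cur, cnt)
--     return out.rstrip()
-- ===== Notes on version B (the rewrite author's own statement) =====
-- stated objective: idiomatic
-- what changed: B replaces A's frequency dict plus a sort of its keys by sorting the full token list once and emitting one formatted chunk per consecutive run of equal words in a single pass.
import Mathlib
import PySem

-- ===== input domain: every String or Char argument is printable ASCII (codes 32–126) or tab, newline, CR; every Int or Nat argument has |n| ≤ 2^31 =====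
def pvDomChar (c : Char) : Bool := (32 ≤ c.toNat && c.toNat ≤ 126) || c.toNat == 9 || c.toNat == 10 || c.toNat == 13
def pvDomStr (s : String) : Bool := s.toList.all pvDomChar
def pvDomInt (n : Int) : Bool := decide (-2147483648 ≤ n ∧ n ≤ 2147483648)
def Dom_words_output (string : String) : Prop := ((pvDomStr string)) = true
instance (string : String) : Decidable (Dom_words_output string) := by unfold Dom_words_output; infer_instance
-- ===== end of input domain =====

-- B sorts the whole token list once and emits one "word:count " per consecutive run
-- (no frequency dict), instead of A's dict of counts plus a sort of its keys — same
-- output, a different algorithm (idiomatic sort-and-group).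

-- ===== PORT A =====
-- A's 'freq[w]' cannot raise: every w comes from freq.keys, so 'getD w 0' is exact there.
def words_output (string : String) : String :=
  let freq : PySem.Dict String Int :=
    (PySem.Str.split₀ string).foldl (fun d word => d.insert word (d.getD word 0 + 1)) PySem.Dict.empty
  let words := PySem.List.sorted freq.keys (fun x => x) false
  let strFinal :=
    words.foldl (fun acc w => acc ++ w ++ ":" ++ PySem.Int.toStr (freq.getD w 0) ++ " ") ""
  PySem.Str.rstrip strFinal

-- ===== PORT B =====
-- the for-loop of Source B: state (cur, cnt, out); flush "cur:cnt " when the run ends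
def wordsAltLoop : List String → Option String → Int → String → String
  | [], none, _, out => out
  | [], some c, cnt, out => out ++ c ++ ":" ++ PySem.Int.toStr cnt ++ " "
  | w :: rest, none, _, out => wordsAltLoop rest (some w) 1 out
  | w :: rest, some c, cnt, out =>
      if w == c then wordsAltLoop rest (some c) (cnt + 1) out
      else wordsAltLoop rest (some w) 1 (out ++ c ++ ":" ++ PySem.Int.toStr cnt ++ " ")

def words_output_alt (string : String) : String :=
  let words := PySem.List.sorted (PySem.Str.split₀ string) (fun x => x) false
  PySem.Str.rstrip (wordsAltLoop words none 0 "")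

-- ===== PRECONDITION & SPEC =====
def Spec_words_output (string : String) (out : String) : Prop := out = words_output_alt string
instance (string : String) (out : String) : Decidable (Spec_words_output string out) := by unfold Spec_words_output; infer_instance

-- ===== CLAIM (what is proved, stated in full; the proofs are below) =====
def Claim_equal_words_output : Prop := ∀ (string : String), Dom_words_output string → Spec_words_output string (words_output string)

-- ===== LEMMAS AND PROOFS =====

-- reference form of B's grouping loop: one "w:(1+run) " chunk per maximal run of the head
def runGroups : List String → String
  | [] => ""
  | w :: rest =>
      (w ++ ":" ++ PySem.Int.toStr (1 + ((rest.takeWhile (· == w)).length : Int)) ++ " ")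
        ++ runGroups (rest.dropWhile (· == w))
termination_by l => l.length
decreasing_by simp; exact List.length_dropWhile_le _ _

-- the first element of each maximal run, in order
def distinctHeads : List String → List String
  | [] => []
  | w :: rest => w :: distinctHeads (rest.dropWhile (· == w))
termination_by l => l.length
decreasing_by simp; exact List.length_dropWhile_le _ _

theorem runGroups_nil : runGroups [] = "" := by rw [runGroups.eq_def]

theorem runGroups_cons (w : String) (rest : List String) :
    runGroups (w :: rest)
      = (w ++ ":" ++ PySem.Int.toStr (1 + ((rest.takeWhile (· == w)).length : Int)) ++ " ")
          ++ runGroups (rest.dropWhile (· == w)) := by rw [runGroups.eq_def]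

theorem distinctHeads_nil : distinctHeads [] = [] := by rw [distinctHeads.eq_def]

theorem distinctHeads_cons (w : String) (rest : List String) :
    distinctHeads (w :: rest) = w :: distinctHeads (rest.dropWhile (· == w)) := by
  rw [distinctHeads.eq_def]

theorem wordsAltLoop_run (ls : List String) (c : String) (cnt : Int) (out : String) :
    wordsAltLoop ls (some c) cnt out
      = out ++ (c ++ ":" ++ PySem.Int.toStr (cnt + ((ls.takeWhile (· == c)).length : Int)) ++ " ")
          ++ runGroups (ls.dropWhile (· == c)) := by
  induction ls generalizing c cnt out with
  | nil => simp [wordsAltLoop, runGroups_nil, String.append_assoc, String.append_empty]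
  | cons w rest ih =>
    by_cases h : w = c
    · subst h
      have hstep : wordsAltLoop (w :: rest) (some w) cnt out
          = wordsAltLoop rest (some w) (cnt + 1) out := by simp [wordsAltLoop]
      rw [hstep, ih, List.takeWhile_cons_of_pos (by simp), List.dropWhile_cons_of_pos (by simp)]
      have e : cnt + 1 + ((rest.takeWhile (· == w)).length : Int)
          = cnt + (((w :: rest.takeWhile (· == w)).length : Nat) : Int) := by
        simp [List.length_cons]; ring
      rw [e]
    · have hb : (w == c) = false := by simp [h]
      have hstep : wordsAltLoop (w :: rest) (some c) cnt out
          = wordsAltLoop rest (some w) 1 (out ++ c ++ ":" ++ PySem.Int.toStr cnt ++ " ") := by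
        simp [wordsAltLoop, hb]
      rw [hstep, ih, List.takeWhile_cons_of_neg (by simp [hb]),
        List.dropWhile_cons_of_neg (by simp [hb]), runGroups_cons]
      simp [String.append_assoc]

theorem wordsAltLoop_start (ls : List String) (cnt : Int) (out : String) :
    wordsAltLoop ls none cnt out = out ++ runGroups ls := by
  cases ls with
  | nil => simp [wordsAltLoop, runGroups_nil, String.append_empty]
  | cons w rest =>
    show wordsAltLoop rest (some w) 1 out = _
    rw [wordsAltLoop_run]
    simp [runGroups_cons, String.append_assoc]

theorem mem_of_mem_distinctHeads (S : List String) (x : String)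
    (h : x ∈ distinctHeads S) : x ∈ S := by
  match S with
  | [] => rw [distinctHeads_nil] at h; simp at h
  | w :: rest =>
    rw [distinctHeads_cons] at h
    rcases List.mem_cons.mp h with h | h
    · simp [h]
    · exact List.mem_cons_of_mem _
        ((List.dropWhile_sublist _).mem (mem_of_mem_distinctHeads _ x h))
termination_by S.length
decreasing_by simp; exact List.length_dropWhile_le _ _

theorem lt_of_mem_dropWhile (w : String) (rest : List String)
    (hp : (w :: rest).Pairwise (· ≤ ·)) (y : String)
    (hy : y ∈ rest.dropWhile (· == w)) : w < y := by
  rcases hd : rest.dropWhile (· == w) with _ | ⟨h0, d'⟩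
  · rw [hd] at hy; simp at hy
  · have hne : rest.dropWhile (· == w) ≠ [] := by simp [hd]
    have h1 := List.head_dropWhile_not (· == w) hne
    have h2 : (rest.dropWhile (· == w)).head hne = h0 := by simp [hd]
    rw [h2] at h1
    have hh' : h0 ≠ w := by simpa using h1
    have hwh : w < h0 := lt_of_le_of_ne
      ((List.pairwise_cons.mp hp).1 h0 ((List.dropWhile_sublist _).mem (by rw [hd]; simp)))
      (Ne.symm hh')
    rw [hd] at hy
    rcases List.mem_cons.mp hy with hy | hy
    · exact hy ▸ hwh
    · have hpd : (h0 :: d').Pairwise (· ≤ ·) := by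
        have := ((List.pairwise_cons.mp hp).2).sublist (List.dropWhile_sublist (· == w))
        rwa [hd] at this
      exact lt_of_lt_of_le hwh ((List.pairwise_cons.mp hpd).1 y hy)

theorem mem_distinctHeads_of_mem (S : List String) (hp : S.Pairwise (· ≤ ·)) (x : String)
    (h : x ∈ S) : x ∈ distinctHeads S := by
  match S with
  | [] => simp at h
  | w :: rest =>
    rw [distinctHeads_cons]
    rcases List.mem_cons.mp h with h | h
    · simp [h]
    · have h' : x ∈ rest.takeWhile (· == w) ++ rest.dropWhile (· == w) := by
        rw [List.takeWhile_append_dropWhile]; exact h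
      rcases List.mem_append.mp h' with h | h
      · have : x = w := by have := List.mem_takeWhile_imp h; simpa using this
        simp [this]
      · have hpd : (rest.dropWhile (· == w)).Pairwise (· ≤ ·) :=
          ((List.pairwise_cons.mp hp).2).sublist (List.dropWhile_sublist _)
        exact List.mem_cons_of_mem _ (mem_distinctHeads_of_mem _ hpd x h)
termination_by S.length
decreasing_by simp; exact List.length_dropWhile_le _ _

theorem distinctHeads_pairwise (S : List String) (hp : S.Pairwise (· ≤ ·)) :
    (distinctHeads S).Pairwise (· < ·) := by
  match S with
  | [] => rw [distinctHeads_nil]; simp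
  | w :: rest =>
    rw [distinctHeads_cons]
    have hpd : (rest.dropWhile (· == w)).Pairwise (· ≤ ·) :=
      ((List.pairwise_cons.mp hp).2).sublist (List.dropWhile_sublist _)
    refine List.pairwise_cons.mpr ⟨?_, distinctHeads_pairwise _ hpd⟩
    intro y hy
    exact lt_of_mem_dropWhile w rest hp y (mem_of_mem_distinctHeads _ y hy)
termination_by S.length
decreasing_by simp; exact List.length_dropWhile_le _ _

theorem foldGroups (S : List String) (hp : S.Pairwise (· ≤ ·)) (out : String) :
    (distinctHeads S).foldl
        (fun acc w => acc ++ w ++ ":" ++ PySem.Int.toStr ((S.count w : Nat) : Int) ++ " ") out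
      = out ++ runGroups S := by
  match S with
  | [] => rw [distinctHeads_nil, runGroups_nil]; simp [String.append_empty]
  | w :: rest =>
    have hpd : (rest.dropWhile (· == w)).Pairwise (· ≤ ·) :=
      ((List.pairwise_cons.mp hp).2).sublist (List.dropWhile_sublist _)
    have hsplit := List.takeWhile_append_dropWhile (p := (· == w)) (l := rest)
    have htcnt : (rest.takeWhile (· == w)).count w = (rest.takeWhile (· == w)).length :=
      List.count_eq_length.mpr (fun b hb => by
        have hbw : b = w := by simpa using List.mem_takeWhile_imp hb
        exact hbw.symm)
    have hdcnt : (rest.dropWhile (· == w)).count w = 0 :=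
      List.count_eq_zero.mpr (fun hmem => lt_irrefl w (lt_of_mem_dropWhile w rest hp w hmem))
    have hrest : rest.count w = (rest.takeWhile (· == w)).length := by
      conv_lhs => rw [← hsplit]
      rw [List.count_append, htcnt, hdcnt]
      omega
    have hcw : (w :: rest).count w = 1 + (rest.takeWhile (· == w)).length := by
      rw [List.count_cons_self, hrest]; omega
    rw [distinctHeads_cons, List.foldl_cons]
    rw [PySem.List.foldl_congr_mem _ _
      (fun acc x => acc ++ x ++ ":" ++
        PySem.Int.toStr (((rest.dropWhile (· == w)).count x : Nat) : Int) ++ " ") _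
      (fun acc x hx => by
        have hxd : x ∈ rest.dropWhile (· == w) := mem_of_mem_distinctHeads _ x hx
        have hxw : x ≠ w := fun he => lt_irrefl w (he ▸ lt_of_mem_dropWhile w rest hp x hxd)
        have htzero : (rest.takeWhile (· == w)).count x = 0 :=
          List.count_eq_zero.mpr (fun hmem => hxw (by
            have := List.mem_takeWhile_imp hmem; simpa using this))
        have hce : (w :: rest).count x = (rest.dropWhile (· == w)).count x := by
          rw [List.count_cons_of_ne (Ne.symm hxw)]
          conv_lhs => rw [← hsplit]
          rw [List.count_append, htzero]; omega
        simp only [hce])]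
    rw [foldGroups (rest.dropWhile (· == w)) hpd]
    rw [runGroups_cons]
    have e : (((w :: rest).count w : Nat) : Int)
        = 1 + ((rest.takeWhile (· == w)).length : Int) := by rw [hcw]; push_cast; ring
    rw [e]
    simp [String.append_assoc]
termination_by S.length
decreasing_by simp; exact List.length_dropWhile_le _ _

theorem sortedSet_eq_distinctHeads (ws : List String) :
    PySem.List.sorted (PySem.Set.ofList ws) (fun x => x) false
      = distinctHeads (PySem.List.sorted ws (fun x => x) false) := by
  have hp : (PySem.List.sorted ws (fun x => x) false).Pairwise (· ≤ ·) := by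
    simpa using PySem.List.sorted_pairwise ws (fun x => x)
  refine PySem.List.sorted_eq_of_perm_of_pairwise_lt _ _ (fun x => x) ?_ ?_
  · refine (List.perm_ext_iff_of_nodup ?_ ?_).mpr ?_
    · exact (distinctHeads_pairwise _ hp).imp ne_of_lt
    · exact PySem.Set.nodup_ofList ws
    · intro a
      constructor
      · intro h
        exact (PySem.Set.mem_ofList ws a).mpr
          ((PySem.List.mem_sorted _ _ _ a).mp (mem_of_mem_distinctHeads _ a h))
      · intro h
        exact mem_distinctHeads_of_mem _ hp a
          ((PySem.List.mem_sorted _ _ _ a).mpr ((PySem.Set.mem_ofList ws a).mp h))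
  · simpa using distinctHeads_pairwise _ hp

-- ===== VERDICT (by name: the statement is the Claim_ definition above) =====
theorem words_output_spec : Claim_equal_words_output := by
  intro s _
  unfold Spec_words_output words_output words_output_alt
  simp only [PySem.Dict.foldl_insert_getD_add_one_eq_counter, PySem.Dict.keys_counter,
    PySem.Dict.getD_counter]
  set ws := PySem.Str.split₀ s with hws
  set S := PySem.List.sorted ws (fun x => x) false with hS
  have hp : S.Pairwise (· ≤ ·) := by simpa using PySem.List.sorted_pairwise ws (fun x => x)
  have hperm : S.Perm ws := PySem.List.sorted_perm ws (fun x => x) false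
  rw [wordsAltLoop_start, sortedSet_eq_distinctHeads]
  rw [PySem.List.foldl_congr_mem _ _
    (fun acc w => acc ++ w ++ ":" ++ PySem.Int.toStr ((S.count w : Nat) : Int) ++ " ") _
    (fun acc x _ => by simp only [hperm.count_eq x])]
  rw [foldGroups S hp]
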